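-- pv_equiv track=rewrite | github.com/AaronShepp/AlphaPlot | AlphaPlot.py | satisfies_constraints
-- ===== SOURCE A (Python) =====
-- MIN_NEIGHBOR_CASES = {0: 1, #for n = 0, mink >= _
--                       1: 1, #for n = 1, mink >= _
--                       2: 1,
--                       3: 0,
--                       4: 0,
--                       5: 0,
--                       6: 0}
--
-- NEIGHBOR_TOLERANCE = {0: 4, #for n = 0, rangek <= _
--                       1: 4,
--                       2: 4,
--                       3: 2,
--                       4: 1,
--                       5: 1,
--                       6: 0}
--
-- def satisfies_constraints(counts, species_list):
--     for sp in species_list: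
--         for other in species_list:
--             for n_neighbors, m in MIN_NEIGHBOR_CASES.items():
--                 if counts[sp][other][n_neighbors] < m:
--                     return False
--
--     for other in species_list:
--         for n_neighbors, tol in NEIGHBOR_TOLERANCE.items():
--             vals = [counts[sp][other][n_neighbors] for sp in species_list]
--             if max(vals) - min(vals) > tol:
--                 return False
--
--     return True
-- ===== SOURCE B (Python) =====
-- MIN_NEIGHBOR_CASES = {0: 1, 1: 1, 2: 1, 3: 0, 4: 0, 5: 0, 6: 0}
-- NEIGHBOR_TOLERANCE = {0: 4, 1: 4, 2: 4, 3: 2, 4: 1, 5: 1, 6: 0}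
--
-- def satisfies_constraints(counts, species_list):
--     # One fused pass over counts (same sp/other/n order as the two-pass version):
--     # check each min constraint immediately and build a running (lo, hi) table
--     # keyed by (other, n); then check the tolerances from the table, reading
--     # each count once instead of twice.
--     tbl = {}
--     for sp in species_list:
--         for other in species_list:
--             for n_neighbors, m in MIN_NEIGHBOR_CASES.items():
--                 c = counts[sp][other][n_neighbors]
--                 if c < m:
--                     return False
--                 k = (other, n_neighbors)
--                 if k in tbl:
--                     lo, hi = tbl[k]
--                     tbl[k] = (c if c < lo else lo, c if hi < c else hi)
--                 else:
--                     tbl[k] = (c, c)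
--     for (other, n_neighbors), (lo, hi) in tbl.items():
--         if hi - lo > NEIGHBOR_TOLERANCE[n_neighbors]:
--             return False
--     return True
-- ===== Notes on version B (the rewrite author's own statement) =====
-- stated objective: alternative
-- what changed: Replaces A's two separate passes over counts (per-entry min check, then per-(other,n) list-building max(vals)-min(vals) spread check) with one fused pass in the same scan order that checks each min constraint and maintains a running (lo,hi) table keyed by (other,n), followed by a pass over the table for the tolerance check, reading each count once instead of twice.
import Mathlib
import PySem

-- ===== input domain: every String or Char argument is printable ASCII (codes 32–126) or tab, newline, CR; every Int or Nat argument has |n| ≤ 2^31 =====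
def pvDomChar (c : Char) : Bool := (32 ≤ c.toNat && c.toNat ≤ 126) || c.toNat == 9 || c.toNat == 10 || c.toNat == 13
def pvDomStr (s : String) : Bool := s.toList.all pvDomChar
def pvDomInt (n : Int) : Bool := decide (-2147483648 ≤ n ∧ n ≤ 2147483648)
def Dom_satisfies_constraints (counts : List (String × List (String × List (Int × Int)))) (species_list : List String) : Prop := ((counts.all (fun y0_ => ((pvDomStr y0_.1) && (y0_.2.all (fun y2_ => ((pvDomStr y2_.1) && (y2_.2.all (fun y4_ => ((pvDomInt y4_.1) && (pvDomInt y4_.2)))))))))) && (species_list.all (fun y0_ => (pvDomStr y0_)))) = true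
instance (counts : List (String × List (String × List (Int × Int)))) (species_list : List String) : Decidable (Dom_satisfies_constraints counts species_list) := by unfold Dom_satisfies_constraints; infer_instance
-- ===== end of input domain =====

-- B fuses A's two passes over counts into one pass (same scan order) that builds a running
-- (lo, hi) table keyed by (other, n), plus a table pass for the tolerances ("alternative").

-- ===== PORT A =====
-- MIN_NEIGHBOR_CASES / NEIGHBOR_TOLERANCE as insertion-ordered association lists
def pvMinCases : List (Int × Int) := [(0,1),(1,1),(2,1),(3,0),(4,0),(5,0),(6,0)]
def pvNeighborTol : List (Int × Int) := [(0,4),(1,4),(2,4),(3,2),(4,1),(5,1),(6,0)]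

-- counts[sp][other][n]; the .getD defaults are unreachable under Pre_ at every lookup either
-- port actually performs before its result is determined
def pvCnt (counts : List (String × List (String × List (Int × Int)))) (sp other : String) (n : Int) : Int :=
  (PySem.Dict.mk ((PySem.Dict.mk ((PySem.Dict.mk counts).getD sp [])).getD other [])).getD n 0

def satisfies_constraints (counts : List (String × List (String × List (Int × Int)))) (species_list : List String) : Bool :=
  (species_list.all (fun sp => species_list.all (fun other =>
      pvMinCases.all (fun p => !(pvCnt counts sp other p.1 < p.2)))))
  &&
  (species_list.all (fun other => pvNeighborTol.all (fun p =>
      !(((PySem.List.max? (species_list.map (fun sp => pvCnt counts sp other p.1)) (fun v => v)).getD 0)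
        - ((PySem.List.min? (species_list.map (fun sp => pvCnt counts sp other p.1)) (fun v => v)).getD 0) > p.2))))

-- ===== PORT B =====
-- table update for one count c at key k (the if k in tbl / else branch of B)
def pvUpd (d : PySem.Dict (String × Int) (Int × Int)) (k : String × Int) (c : Int) :
    PySem.Dict (String × Int) (Int × Int) :=
  match d.get? k with
  | none => d.insert k (c, c)
  | some (lo, hi) => d.insert k ((if c < lo then c else lo), (if hi < c then c else hi))

-- innermost loop body: min check (None = early False) then table update
def pvStep3 (counts : List (String × List (String × List (Int × Int)))) (sp other : String)
    (st : Option (PySem.Dict (String × Int) (Int × Int))) (p : Int × Int) :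
    Option (PySem.Dict (String × Int) (Int × Int)) :=
  match st with
  | none => none
  | some d =>
    if pvCnt counts sp other p.1 < p.2 then none
    else some (pvUpd d (other, p.1) (pvCnt counts sp other p.1))

def pvStep2 (counts : List (String × List (String × List (Int × Int)))) (sp : String)
    (st : Option (PySem.Dict (String × Int) (Int × Int))) (other : String) :
    Option (PySem.Dict (String × Int) (Int × Int)) :=
  pvMinCases.foldl (pvStep3 counts sp other) st

def pvStep1 (counts : List (String × List (String × List (Int × Int)))) (sl : List String)
    (st : Option (PySem.Dict (String × Int) (Int × Int))) (sp : String) :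
    Option (PySem.Dict (String × Int) (Int × Int)) :=
  sl.foldl (pvStep2 counts sp) st

def satisfies_constraints_alt (counts : List (String × List (String × List (Int × Int)))) (species_list : List String) : Bool :=
  match species_list.foldl (pvStep1 counts species_list) (some PySem.Dict.empty) with
  | none => false
  | some d => d.items.all (fun q => !(q.2.2 - q.2.1 > (PySem.Dict.mk pvNeighborTol).getD q.1.2 0))

-- ===== PRECONDITION & SPEC =====
-- Pre_ admits inputs where every species/neighbor key is present, and also inputs whose very
-- first scanned cell counts[sl[0]][sl[0]] already violates a min constraint (both programs
-- return False there before touching any other key); the remaining inputs with missing keys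
-- are excluded because the Python A raises KeyError on them or returns False early only as an
-- accident of its scan order (B returns the same value there too).
def Pre_satisfies_constraints (counts : List (String × List (String × List (Int × Int)))) (species_list : List String) : Prop :=
  ((species_list.all (fun sp =>
      match (PySem.Dict.mk counts).get? sp with
      | none => false
      | some row => species_list.all (fun other =>
          match (PySem.Dict.mk row).get? other with
          | none => false
          | some cell => pvMinCases.all (fun p => ((PySem.Dict.mk cell).get? p.1).isSome))))
   ||
   (match species_list with
    | [] => false
    | x :: _ =>
      match (PySem.Dict.mk counts).get? x with
      | none => false
      | some row =>
        match (PySem.Dict.mk row).get? x with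
        | none => false
        | some cell =>
          pvMinCases.any (fun p =>
            (pvMinCases.all (fun q => !(decide (q.1 ≤ p.1)) || ((PySem.Dict.mk cell).get? q.1).isSome)) &&
            ((PySem.Dict.mk cell).getD p.1 0 < p.2)))) = true
instance (counts : List (String × List (String × List (Int × Int)))) (species_list : List String) : Decidable (Pre_satisfies_constraints counts species_list) := by unfold Pre_satisfies_constraints; infer_instance

def pvWitness_satisfies_constraints : (List (String × List (String × List (Int × Int)))) × List String :=
  ([("a", [("a", [(0,1),(1,1),(2,1),(3,0),(4,0),(5,0),(6,0)])])], ["a"])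

def Spec_satisfies_constraints (counts : List (String × List (String × List (Int × Int)))) (species_list : List String) (out : Bool) : Prop := out = satisfies_constraints_alt counts species_list
instance (counts : List (String × List (String × List (Int × Int)))) (species_list : List String) (out : Bool) : Decidable (Spec_satisfies_constraints counts species_list out) := by unfold Spec_satisfies_constraints; infer_instance

-- ===== CLAIM (what is proved, stated in full; the proofs are below) =====
def Claim_equal_satisfies_constraints : Prop := ∀ (counts : List (String × List (String × List (Int × Int)))) (species_list : List String), Dom_satisfies_constraints counts species_list → Pre_satisfies_constraints counts species_list → Spec_satisfies_constraints counts species_list (satisfies_constraints counts species_list)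

-- ===== LEMMAS AND PROOFS =====

-- running (lo, hi) update as a value transformer (proof-side model of pvUpd's stored value)
def pvStep (c : Int) : Option (Int × Int) → Option (Int × Int)
  | none => some (c, c)
  | some (lo, hi) => some ((if c < lo then c else lo), (if hi < c then c else hi))

-- pure (check-free) forms of B's table updates
def pvUpdN (counts : List (String × List (String × List (Int × Int)))) (sp other : String)
    (d : PySem.Dict (String × Int) (Int × Int)) : PySem.Dict (String × Int) (Int × Int) :=
  pvMinCases.foldl (fun d p => pvUpd d (other, p.1) (pvCnt counts sp other p.1)) d

def pvUpdO (counts : List (String × List (String × List (Int × Int)))) (sl : List String) (sp : String)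
    (d : PySem.Dict (String × Int) (Int × Int)) : PySem.Dict (String × Int) (Int × Int) :=
  sl.foldl (fun d other => pvUpdN counts sp other d) d

lemma pv_upd_get? (d : PySem.Dict (String × Int) (Int × Int)) (k k' : String × Int) (c : Int) :
    (pvUpd d k c).get? k' = if k' = k then pvStep c (d.get? k) else d.get? k' := by
  unfold pvUpd
  cases h : d.get? k with
  | none => simp only [pvStep, PySem.Dict.get?_insert]
  | some lohi =>
    obtain ⟨lo, hi⟩ := lohi
    simp only [pvStep, PySem.Dict.get?_insert]

lemma pv_step_idem (c : Int) (v : Option (Int × Int)) : pvStep c (pvStep c v) = pvStep c v := by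
  cases v with
  | none => simp only [pvStep, Option.some.injEq, Prod.mk.injEq]; constructor <;> split_ifs <;> omega
  | some lohi =>
    obtain ⟨lo, hi⟩ := lohi
    simp only [pvStep, Option.some.injEq, Prod.mk.injEq]
    constructor <;> split_ifs <;> omega

lemma pv_fold_upd_get? (o : String) (g : Int → Int) (ps : List (Int × Int))
    (hnd : (ps.map Prod.fst).Nodup) (d : PySem.Dict (String × Int) (Int × Int)) (k1 : String) (k2 : Int) :
    (ps.foldl (fun d p => pvUpd d (o, p.1) (g p.1)) d).get? (k1, k2)
      = if k1 = o ∧ k2 ∈ ps.map Prod.fst then pvStep (g k2) (d.get? (k1, k2)) else d.get? (k1, k2) := by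
  induction ps generalizing d with
  | nil => simp
  | cons p ps ih =>
    rw [List.map_cons, List.nodup_cons] at hnd
    rw [List.foldl_cons, ih hnd.2, pv_upd_get?]
    by_cases h1 : k1 = o
    · subst h1
      by_cases h3 : k2 = p.1
      · subst h3
        simp [hnd.1, List.mem_cons]
      · by_cases h2 : k2 ∈ ps.map Prod.fst <;>
          simp [h2, h3, List.mem_cons, Prod.mk.injEq]
    · simp [h1, List.mem_cons, Prod.mk.injEq]

lemma pv_updN_get? (counts : List (String × List (String × List (Int × Int)))) (sp other : String)
    (d : PySem.Dict (String × Int) (Int × Int)) (k1 : String) (k2 : Int) :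
    (pvUpdN counts sp other d).get? (k1, k2)
      = if k1 = other ∧ k2 ∈ pvMinCases.map Prod.fst
        then pvStep (pvCnt counts sp other k2) (d.get? (k1, k2)) else d.get? (k1, k2) := by
  unfold pvUpdN
  exact pv_fold_upd_get? other (fun n => pvCnt counts sp other n) pvMinCases (by decide) d k1 k2

lemma pv_updO_get? (counts : List (String × List (String × List (Int × Int)))) (sl : List String)
    (sp : String) (d : PySem.Dict (String × Int) (Int × Int)) (k1 : String) (k2 : Int) :
    (pvUpdO counts sl sp d).get? (k1, k2)
      = if k1 ∈ sl ∧ k2 ∈ pvMinCases.map Prod.fst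
        then pvStep (pvCnt counts sp k1 k2) (d.get? (k1, k2)) else d.get? (k1, k2) := by
  unfold pvUpdO
  induction sl generalizing d with
  | nil => simp
  | cons o O ih =>
    rw [List.foldl_cons, ih, pv_updN_get?]
    by_cases h1 : k1 = o
    · subst h1
      by_cases h2 : k2 ∈ pvMinCases.map Prod.fst
      · by_cases h3 : k1 ∈ O
        · simp [h2, h3, List.mem_cons, pv_step_idem]
        · simp [h2, h3, List.mem_cons]
      · simp [h2, List.mem_cons]
    · by_cases h3 : k1 ∈ O <;> by_cases h2 : k2 ∈ pvMinCases.map Prod.fst <;>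
        simp [h1, h2, h3, List.mem_cons]

lemma pv_updS_get? (counts : List (String × List (String × List (Int × Int)))) (sl : List String)
    (S : List String) (d : PySem.Dict (String × Int) (Int × Int)) (k1 : String) (k2 : Int) :
    (S.foldl (fun d sp => pvUpdO counts sl sp d) d).get? (k1, k2)
      = if k1 ∈ sl ∧ k2 ∈ pvMinCases.map Prod.fst
        then S.foldl (fun acc sp => pvStep (pvCnt counts sp k1 k2) acc) (d.get? (k1, k2))
        else d.get? (k1, k2) := by
  induction S generalizing d with
  | nil => split_ifs <;> rfl
  | cons sp S ih =>
    rw [List.foldl_cons, ih, pv_updO_get?, List.foldl_cons]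
    split_ifs with h
    · rfl
    · rfl

lemma pv_foldl_step_some {α : Type} (f : α → Int) (xs : List α) (lo hi : Int) :
    xs.foldl (fun acc sp => pvStep (f sp) acc) (some (lo, hi))
      = some (xs.foldl (fun a sp => min a (f sp)) lo,
              xs.foldl (fun a sp => max a (f sp)) hi) := by
  induction xs generalizing lo hi with
  | nil => rfl
  | cons y ys ih =>
    simp only [List.foldl_cons]
    rw [show pvStep (f y) (some (lo, hi))
          = some ((if f y < lo then f y else lo), (if hi < f y then f y else hi)) from rfl,
        ih]
    have h1 : (if f y < lo then f y else lo) = min lo (f y) := by rw [min_def]; split_ifs <;> omega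
    have h2 : (if hi < f y then f y else hi) = max hi (f y) := by rw [max_def]; split_ifs <;> omega
    rw [h1, h2]

-- keys stay nodup through the table updates
lemma pv_nodup_upd (d : PySem.Dict (String × Int) (Int × Int)) (k : String × Int) (c : Int)
    (h : d.keys.Nodup) : (pvUpd d k c).keys.Nodup := by
  unfold pvUpd
  cases hg : d.get? k with
  | none => exact PySem.Dict.nodup_keys_insert _ _ _ h
  | some lohi =>
    obtain ⟨lo, hi⟩ := lohi
    exact PySem.Dict.nodup_keys_insert _ _ _ h

lemma pv_foldl_nodup {α : Type} (g : PySem.Dict (String × Int) (Int × Int) → α → PySem.Dict (String × Int) (Int × Int))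
    (hg : ∀ d a, d.keys.Nodup → (g d a).keys.Nodup) (l : List α)
    (d : PySem.Dict (String × Int) (Int × Int)) (h : d.keys.Nodup) : (l.foldl g d).keys.Nodup := by
  induction l generalizing d with
  | nil => exact h
  | cons a l ih => exact ih _ (hg d a h)

lemma pv_T_nodup (counts : List (String × List (String × List (Int × Int)))) (sl S : List String) :
    ((S.foldl (fun d sp => pvUpdO counts sl sp d) PySem.Dict.empty)).keys.Nodup := by
  refine pv_foldl_nodup _ ?_ S PySem.Dict.empty ?_
  · intro d sp h
    unfold pvUpdO
    refine pv_foldl_nodup _ ?_ sl d h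
    intro d other h
    unfold pvUpdN
    refine pv_foldl_nodup _ ?_ pvMinCases d h
    intro d p h
    exact pv_nodup_upd d _ _ h
  · simp [PySem.Dict.keys_empty]

-- once the state is None it stays None
lemma pv_absorb3 (counts : List (String × List (String × List (Int × Int)))) (sp other : String)
    (ps : List (Int × Int)) : ps.foldl (pvStep3 counts sp other) none = none := by
  induction ps with
  | nil => rfl
  | cons p ps ih =>
    rw [List.foldl_cons, show pvStep3 counts sp other none p = none from rfl]
    exact ih

lemma pv_absorb2 (counts : List (String × List (String × List (Int × Int)))) (sp : String)
    (O : List String) : O.foldl (pvStep2 counts sp) none = none := by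
  induction O with
  | nil => rfl
  | cons o O ih =>
    rw [List.foldl_cons,
        show pvStep2 counts sp none o = none from by
          unfold pvStep2; exact pv_absorb3 counts sp o pvMinCases]
    exact ih

-- phase 1 = min-constraint check + pure table build
lemma pv_phase3 (counts : List (String × List (String × List (Int × Int)))) (sp other : String)
    (ps : List (Int × Int)) (d : PySem.Dict (String × Int) (Int × Int)) :
    ps.foldl (pvStep3 counts sp other) (some d)
      = if ps.all (fun p => !(pvCnt counts sp other p.1 < p.2))
        then some (ps.foldl (fun d p => pvUpd d (other, p.1) (pvCnt counts sp other p.1)) d)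
        else none := by
  induction ps generalizing d with
  | nil => rfl
  | cons p ps ih =>
    rw [List.foldl_cons, List.all_cons, List.foldl_cons]
    by_cases hc : pvCnt counts sp other p.1 < p.2
    · rw [show pvStep3 counts sp other (some d) p = none from by simp [pvStep3, hc],
          pv_absorb3]
      simp [hc]
    · rw [show pvStep3 counts sp other (some d) p
            = some (pvUpd d (other, p.1) (pvCnt counts sp other p.1)) from by simp [pvStep3, hc],
          ih, decide_eq_false hc, Bool.not_false, Bool.true_and]

lemma pv_phase2 (counts : List (String × List (String × List (Int × Int)))) (sp : String)
    (O : List String) (d : PySem.Dict (String × Int) (Int × Int)) :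
    O.foldl (pvStep2 counts sp) (some d)
      = if O.all (fun other => pvMinCases.all (fun p => !(pvCnt counts sp other p.1 < p.2)))
        then some (O.foldl (fun d other => pvUpdN counts sp other d) d)
        else none := by
  induction O generalizing d with
  | nil => rfl
  | cons o O ih =>
    rw [List.foldl_cons, List.all_cons, List.foldl_cons]
    rw [show pvStep2 counts sp (some d) o = pvMinCases.foldl (pvStep3 counts sp o) (some d) from rfl,
        pv_phase3]
    by_cases hc : pvMinCases.all (fun p => !(pvCnt counts sp o p.1 < p.2)) = true
    · rw [if_pos hc, ih]
      have : (pvMinCases.foldl (fun d p => pvUpd d (o, p.1) (pvCnt counts sp o p.1)) d)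
          = pvUpdN counts sp o d := rfl
      rw [this, hc, Bool.true_and]
    · simp only [Bool.not_eq_true] at hc
      rw [if_neg (by simp [hc]), pv_absorb2, hc]
      simp

lemma pv_absorb1 (counts : List (String × List (String × List (Int × Int)))) (sl : List String)
    (S : List String) : S.foldl (pvStep1 counts sl) none = none := by
  induction S with
  | nil => rfl
  | cons sp S ih =>
    rw [List.foldl_cons, show pvStep1 counts sl none sp = none from by
      unfold pvStep1; exact pv_absorb2 counts sp sl]
    exact ih

lemma pv_phase1 (counts : List (String × List (String × List (Int × Int)))) (sl : List String)
    (S : List String) (d : PySem.Dict (String × Int) (Int × Int)) :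
    S.foldl (pvStep1 counts sl) (some d)
      = if S.all (fun sp => sl.all (fun other => pvMinCases.all (fun p => !(pvCnt counts sp other p.1 < p.2))))
        then some (S.foldl (fun d sp => pvUpdO counts sl sp d) d)
        else none := by
  induction S generalizing d with
  | nil => rfl
  | cons sp S ih =>
    rw [List.foldl_cons, List.all_cons, List.foldl_cons]
    rw [show pvStep1 counts sl (some d) sp
          = if sl.all (fun other => pvMinCases.all (fun p => !(pvCnt counts sp other p.1 < p.2)))
            then some (pvUpdO counts sl sp d) else none from by
        unfold pvStep1 pvUpdO; exact pv_phase2 counts sp sl d]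
    by_cases hc : sl.all (fun other => pvMinCases.all (fun p => !(pvCnt counts sp other p.1 < p.2))) = true
    · rw [if_pos hc, ih, hc, Bool.true_and]
    · simp only [Bool.not_eq_true] at hc
      rw [if_neg (by simp [hc]), pv_absorb1, hc]
      simp

-- 7-entry table facts
lemma pv_tol_fact : ∀ p ∈ pvNeighborTol,
    p.1 ∈ pvMinCases.map Prod.fst ∧ (PySem.Dict.mk pvNeighborTol).getD p.1 0 = p.2 := by decide

lemma pv_key_fact : ∀ n ∈ pvMinCases.map Prod.fst,
    (n, (PySem.Dict.mk pvNeighborTol).getD n 0) ∈ pvNeighborTol := by decide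

-- A's spread check rewritten as the running folds
lemma pv_a2comp (counts : List (String × List (String × List (Int × Int)))) (o x : String)
    (xs : List String) (n t : Int) :
    (!(((PySem.List.max? ((x :: xs).map (fun sp => pvCnt counts sp o n)) (fun v => v)).getD 0)
      - ((PySem.List.min? ((x :: xs).map (fun sp => pvCnt counts sp o n)) (fun v => v)).getD 0) > t))
    = !((xs.foldl (fun a sp => max a (pvCnt counts sp o n)) (pvCnt counts x o n))
      - (xs.foldl (fun a sp => min a (pvCnt counts sp o n)) (pvCnt counts x o n)) > t) := by
  rw [List.map_cons, PySem.List.max?_id_cons, PySem.List.min?_id_cons,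
      Option.getD_some, Option.getD_some, List.foldl_map, List.foldl_map]

-- phase 2: A's second pass over counts = B's pass over the built table
lemma pv_phase2eq (counts : List (String × List (String × List (Int × Int)))) (x : String) (xs : List String) :
    ((x :: xs).all (fun other => pvNeighborTol.all (fun p =>
        !(((PySem.List.max? ((x :: xs).map (fun sp => pvCnt counts sp other p.1)) (fun v => v)).getD 0)
          - ((PySem.List.min? ((x :: xs).map (fun sp => pvCnt counts sp other p.1)) (fun v => v)).getD 0) > p.2))))
    = ((x :: xs).foldl (fun d sp => pvUpdO counts (x :: xs) sp d) PySem.Dict.empty).items.all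
        (fun q => !(q.2.2 - q.2.1 > (PySem.Dict.mk pvNeighborTol).getD q.1.2 0)) := by
  have hnd := pv_T_nodup counts (x :: xs) (x :: xs)
  have hget : ∀ (k1 : String) (k2 : Int),
      ((x :: xs).foldl (fun d sp => pvUpdO counts (x :: xs) sp d) PySem.Dict.empty).get? (k1, k2)
        = if k1 ∈ x :: xs ∧ k2 ∈ pvMinCases.map Prod.fst
          then some (xs.foldl (fun a sp => min a (pvCnt counts sp k1 k2)) (pvCnt counts x k1 k2),
                     xs.foldl (fun a sp => max a (pvCnt counts sp k1 k2)) (pvCnt counts x k1 k2))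
          else none := by
    intro k1 k2
    rw [pv_updS_get?, PySem.Dict.get?_empty]
    split_ifs with h
    · rw [List.foldl_cons, show pvStep (pvCnt counts x k1 k2) none
            = some (pvCnt counts x k1 k2, pvCnt counts x k1 k2) from rfl,
          pv_foldl_step_some (fun sp => pvCnt counts sp k1 k2)]
    · rfl
  rw [Bool.eq_iff_iff]
  simp only [List.all_eq_true]
  constructor
  · intro H q hq
    obtain ⟨⟨k1, k2⟩, lo, hi⟩ := q
    have hg := PySem.Dict.get?_of_mem_items _ hq hnd
    rw [hget k1 k2] at hg
    by_cases hc : k1 ∈ x :: xs ∧ k2 ∈ pvMinCases.map Prod.fst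
    · rw [if_pos hc] at hg
      simp only [Option.some.injEq, Prod.mk.injEq] at hg
      obtain ⟨hlo, hhi⟩ := hg
      have h2 := H k1 hc.1 (k2, (PySem.Dict.mk pvNeighborTol).getD k2 0) (pv_key_fact k2 hc.2)
      simp only [pv_a2comp] at h2
      rw [← hlo, ← hhi]
      exact h2
    · rw [if_neg hc] at hg
      exact absurd hg (by simp)
  · intro H o ho p hp
    rw [pv_a2comp]
    obtain ⟨hk, ht⟩ := pv_tol_fact p hp
    have hg : ((x :: xs).foldl (fun d sp => pvUpdO counts (x :: xs) sp d) PySem.Dict.empty).get? (o, p.1)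
        = some (xs.foldl (fun a sp => min a (pvCnt counts sp o p.1)) (pvCnt counts x o p.1),
                xs.foldl (fun a sp => max a (pvCnt counts sp o p.1)) (pvCnt counts x o p.1)) := by
      rw [hget o p.1, if_pos ⟨ho, hk⟩]
    have hmem := PySem.Dict.mem_items_of_get?_eq_some _ hg
    have h2 := H _ hmem
    simp only [ht] at h2
    exact h2

lemma pv_main (counts : List (String × List (String × List (Int × Int)))) (sl : List String) :
    satisfies_constraints counts sl = satisfies_constraints_alt counts sl := by
  cases sl with
  | nil => rfl
  | cons x xs =>
    unfold satisfies_constraints satisfies_constraints_alt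
    rw [pv_phase1]
    by_cases hA : ((x :: xs).all (fun sp => (x :: xs).all (fun other =>
        pvMinCases.all (fun p => !(pvCnt counts sp other p.1 < p.2))))) = true
    · rw [if_pos hA, hA, Bool.true_and]
      exact pv_phase2eq counts x xs
    · simp only [Bool.not_eq_true] at hA
      rw [hA]
      simp

-- ===== VERDICT (by name: the statement is the Claim_ definition above) =====
theorem satisfies_constraints_spec : Claim_equal_satisfies_constraints := by
  intro counts species_list _ _
  unfold Spec_satisfies_constraints
  exact pv_main counts species_list
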